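-- pv_equiv track=rewrite | github.com/AbdelalimMazeghrane/cryptanalyse_vigenere | cryptanalyse_vigenere.py | colonnes_txt
-- ===== SOURCE A (Python) =====
-- def colonnes_txt(cipher,keylen):
--     """
--         permet de recuerer les colones du textes
--     """
--     col=[]
--     for j in range(0,keylen):
--         s=""
--         k=j
--         while(k<len(cipher)):
--             s += cipher[k]
--             k += keylen
--
--         col.append(s)
--     return col
-- ===== SOURCE B (Python) =====
-- def colonnes_txt(cipher, keylen):
--     """Single-pass scatter: distribute each character into its column by index mod keylen."""
--     if keylen <= 0:
--         return []
--     col = [""] * keylen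
--     i = 0
--     for ch in cipher:
--         col[i % keylen] += ch
--         i += 1
--     return col
-- ===== Notes on version B (the rewrite author's own statement) =====
-- stated objective: alternative
-- what changed: Replaces A's nested gather (one strided inner scan per column) by a single scatter pass over the text that appends each character to column i % keylen.
import Mathlib
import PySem

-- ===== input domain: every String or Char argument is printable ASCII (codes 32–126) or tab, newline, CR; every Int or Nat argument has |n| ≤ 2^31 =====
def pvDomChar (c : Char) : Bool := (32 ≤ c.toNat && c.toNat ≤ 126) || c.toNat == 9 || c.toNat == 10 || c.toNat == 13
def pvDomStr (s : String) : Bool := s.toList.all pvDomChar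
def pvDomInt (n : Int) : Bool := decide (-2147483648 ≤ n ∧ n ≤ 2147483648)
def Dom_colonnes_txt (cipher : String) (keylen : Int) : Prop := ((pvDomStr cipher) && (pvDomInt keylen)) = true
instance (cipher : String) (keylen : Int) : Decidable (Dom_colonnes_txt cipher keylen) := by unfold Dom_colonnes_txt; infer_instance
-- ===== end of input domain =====

-- B replaces A's per-column strided gather by a single scatter pass over the text (alternative
-- decomposition, same cost); both are total, so no Pre_ is needed.

-- ===== PORT A =====
-- inner while-loop of A: s += cipher[k]; k += keylen, while k < len(cipher).
-- The guards 0 ≤ k and 0 < keylen are totality guards only: every call has 0 ≤ k, and when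
-- keylen ≤ 0 the outer range(0, keylen) is empty so the loop is never entered in Python.
def colonnesInner (chars : List Char) (keylen k : Int) (s : List Char) : List Char :=
  if h : 0 ≤ k ∧ k < (chars.length : Int) ∧ 0 < keylen then
    colonnesInner chars keylen (k + keylen) (s ++ [chars[k.toNat]'(by omega)])
  else s
termination_by ((chars.length : Int) - k).toNat
decreasing_by omega

def colonnes_txt (cipher : String) (keylen : Int) : List String :=
  (PySem.List.pyRange 0 keylen 1).foldl
    (fun col j => col ++ [String.ofList (colonnesInner cipher.toList keylen j [])]) []

-- ===== PORT B =====
-- the scatter loop of Source B: col[i % keylen] += ch; i += 1.  i stays ≥ 0 throughout, so it is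
-- carried as a Nat and Python's % on it is Nat.mod.
def scatterB (K : Nat) : List Char → Nat → List (List Char) → List (List Char)
  | [], _, cols => cols
  | c :: cs, i, cols => scatterB K cs (i + 1) (cols.set (i % K) ((cols.getD (i % K) []) ++ [c]))

def colonnes_txt_alt (cipher : String) (keylen : Int) : List String :=
  if keylen ≤ 0 then []
  else
    (scatterB keylen.toNat cipher.toList 0 (List.replicate keylen.toNat [])).map String.ofList

-- ===== PRECONDITION & SPEC =====
def Spec_colonnes_txt (cipher : String) (keylen : Int) (out : List String) : Prop := out = colonnes_txt_alt cipher keylen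
instance (cipher : String) (keylen : Int) (out : List String) : Decidable (Spec_colonnes_txt cipher keylen out) := by unfold Spec_colonnes_txt; infer_instance

-- ===== CLAIM (what is proved, stated in full; the proofs are below) =====
def Claim_equal_colonnes_txt : Prop := ∀ (cipher : String) (keylen : Int), Dom_colonnes_txt cipher keylen → Spec_colonnes_txt cipher keylen (colonnes_txt cipher keylen)

-- ===== LEMMAS AND PROOFS =====

-- canonical column j (countdown form, structural in the text): take a char when the countdown
-- hits 0, restart the countdown at Km1 (= K - 1).
def gcol (Km1 : Nat) : List Char → Nat → List Char
  | [], _ => []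
  | c :: cs, r => if r = 0 then c :: gcol Km1 cs Km1 else gcol Km1 cs (r - 1)

-- canonical column (index form, as A walks it): chars at positions p, p + Km1 + 1, …
def gidx (Km1 : Nat) (cs : List Char) (p : Nat) : List Char :=
  if h : p < cs.length then cs[p] :: gidx Km1 cs (p + Km1 + 1) else []
termination_by cs.length - p

-- canonical column (mod form, as B selects it): chars whose running index i has i % K = j.
def selC (K : Nat) : List Char → Nat → Nat → List Char
  | [], _, _ => []
  | c :: cs, i, j => if i % K = j then c :: selC K cs (i + 1) j else selC K cs (i + 1) j

theorem gidx_pos (Km1 : Nat) (cs : List Char) (p : Nat) (h : p < cs.length) :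
    gidx Km1 cs p = cs[p] :: gidx Km1 cs (p + Km1 + 1) := by
  rw [gidx.eq_def, dif_pos h]

theorem gidx_neg (Km1 : Nat) (cs : List Char) (p : Nat) (h : ¬ p < cs.length) :
    gidx Km1 cs p = [] := by
  rw [gidx.eq_def, dif_neg h]

theorem gidx_cons (Km1 : Nat) (c : Char) (cs : List Char) (p : Nat) :
    gidx Km1 (c :: cs) (p + 1) = gidx Km1 cs p := by
  fun_induction gidx Km1 cs p with
  | case1 p h ih =>
    rw [gidx_pos Km1 (c :: cs) (p + 1) (by simp only [List.length_cons]; omega)]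
    simp only [List.getElem_cons_succ]
    rw [show p + 1 + Km1 + 1 = (p + Km1 + 1) + 1 from by omega, ih]
  | case2 p h =>
    rw [gidx_neg Km1 (c :: cs) (p + 1) (by simp only [List.length_cons]; omega)]

theorem gcol_eq_gidx (Km1 : Nat) (cs : List Char) (r : Nat) :
    gcol Km1 cs r = gidx Km1 cs r := by
  induction cs generalizing r with
  | nil => rw [gcol, gidx]; simp
  | cons c cs ih =>
    rcases r with _ | r
    · rw [gcol, if_pos rfl, gidx_pos Km1 (c :: cs) 0 (by simp)]
      simp only [List.getElem_cons_zero, Nat.zero_add]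
      rw [gidx_cons, ih]
    · rw [gcol, if_neg (by omega)]
      simpa [ih] using (gidx_cons Km1 c cs r).symm

theorem colonnesInner_eq (chars : List Char) (keylen k : Int) (s : List Char) :
    0 < keylen → 0 ≤ k →
      colonnesInner chars keylen k s = s ++ gidx (keylen.toNat - 1) chars k.toNat := by
  fun_induction colonnesInner chars keylen k s with
  | case1 k s h ih =>
    intro hK hk
    rw [ih hK (by omega), gidx_pos (keylen.toNat - 1) chars k.toNat (by omega)]
    rw [show k.toNat + (keylen.toNat - 1) + 1 = (k + keylen).toNat from by omega]
    simp
  | case2 k s h =>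
    intro hK hk
    rw [gidx_neg _ _ _ (by omega)]
    simp

theorem selC_add_K (K : Nat) (cs : List Char) (i j : Nat) :
    selC K cs (i + K) j = selC K cs i j := by
  induction cs generalizing i with
  | nil => rfl
  | cons c cs ih =>
    rw [selC, selC, Nat.add_mod_right]
    have : i + K + 1 = (i + 1) + K := by omega
    rw [this, ih]

-- distance from running index r to column j (both < K), without mod
theorem selC_eq_gcol (K : Nat) (hK : 0 < K) (cs : List Char) :
    ∀ r j, r < K → j < K →
      selC K cs r j = gcol (K - 1) cs (if r ≤ j then j - r else j + K - r) := by
  induction cs with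
  | nil => intro r j _ _; rfl
  | cons c cs ih =>
    intro r j hr hj
    have hstep : selC K cs (r + 1) j = gcol (K - 1) cs (if r + 1 ≤ j then j - (r + 1) else j + K - (r + 1)) := by
      by_cases hK1 : r + 1 < K
      · exact ih (r + 1) j hK1 hj
      · have hrK : r + 1 = K := by omega
        have h0 : selC K cs (r + 1) j = selC K cs 0 j := by
          rw [hrK]; simpa using selC_add_K K cs 0 j
        rw [h0, ih 0 j hK hj]
        rw [if_pos (Nat.zero_le j), if_neg (by omega), Nat.sub_zero]
        congr 1
        omega
    rw [selC, Nat.mod_eq_of_lt hr, gcol]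
    by_cases hrj : r = j
    · have hd0 : (if r ≤ j then j - r else j + K - r) = 0 := by
        rw [if_pos (by omega)]; omega
      rw [if_pos hrj, if_pos hd0, hstep, if_neg (by omega)]
      congr 2
      omega
    · have hdpos : 0 < (if r ≤ j then j - r else j + K - r) := by
        split_ifs <;> omega
      rw [if_neg hrj, if_neg (by omega), hstep]
      congr 1
      split_ifs <;> omega

theorem map_range_getD (K : Nat) (cols : List (List Char)) (h : cols.length = K) :
    (List.range K).map (fun j => cols.getD j []) = cols := by
  apply List.ext_getElem
  · simp [h]
  · intro n h1 h2
    simp only [List.getElem_map, List.getElem_range]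
    rw [List.getD_eq_getElem cols [] (by simpa [h] using h2)]

theorem scatterB_eq (K : Nat) (hK : 0 < K) (cs : List Char) :
    ∀ (i : Nat) (cols : List (List Char)), cols.length = K →
      scatterB K cs i cols = (List.range K).map (fun j => cols.getD j [] ++ selC K cs i j) := by
  induction cs with
  | nil =>
    intro i cols h
    rw [scatterB]
    simp only [selC, List.append_nil]
    exact (map_range_getD K cols h).symm
  | cons c cs ih =>
    intro i cols h
    have hm : i % K < K := Nat.mod_lt _ hK
    have hm' : i % K < cols.length := by omega
    rw [scatterB, ih (i + 1) _ (by simp [h])]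
    apply List.map_congr_left
    intro j hj
    have hjK : j < K := List.mem_range.mp hj
    have hgd : (cols.set (i % K) (cols.getD (i % K) [] ++ [c])).getD j [] =
        if j = i % K then cols.getD (i % K) [] ++ [c] else cols.getD j [] := by
      rw [List.getD_eq_getElem _ [] (by simpa [h] using hjK), List.getElem_set]
      by_cases hji : j = i % K
      · rw [if_pos hji.symm, if_pos hji]
      · rw [if_neg (fun hh => hji hh.symm), if_neg hji]
        exact (List.getD_eq_getElem cols [] (by omega)).symm
    rw [hgd, selC]
    by_cases hji : i % K = j
    · subst hji
      simp
    · rw [if_neg (fun hh => hji hh.symm), if_neg hji]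

theorem colonnes_txt_eq_alt (cipher : String) (keylen : Int) :
    colonnes_txt cipher keylen = colonnes_txt_alt cipher keylen := by
  by_cases hK : keylen ≤ 0
  · rw [colonnes_txt, colonnes_txt_alt, if_pos hK, PySem.List.pyRange_one_eq_nil hK]
    rfl
  · have hKpos : 0 < keylen := by omega
    have hKn : 0 < keylen.toNat := by omega
    rw [colonnes_txt, colonnes_txt_alt, if_neg hK]
    rw [PySem.List.foldl_append_singleton_eq_map, PySem.List.pyRange_one 0 keylen]
    rw [scatterB_eq keylen.toNat hKn cipher.toList 0 _ (by simp)]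
    simp only [Int.sub_zero, List.map_map, List.map_map]
    apply List.map_congr_left
    intro j hj
    have hjK : j < keylen.toNat := List.mem_range.mp hj
    simp only [Function.comp_apply, Int.zero_add]
    rw [colonnesInner_eq cipher.toList keylen (j : Int) [] hKpos (by omega)]
    rw [selC_eq_gcol keylen.toNat hKn cipher.toList 0 j hKn hjK,
        gcol_eq_gidx]
    simp

-- ===== VERDICT (by name: the statement is the Claim_ definition above) =====
theorem colonnes_txt_spec : Claim_equal_colonnes_txt := by
  intro cipher keylen _
  unfold Spec_colonnes_txt
  exact colonnes_txt_eq_alt cipher keylen
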